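-- pv_equiv track=rewrite | github.com/yannickloth/W33-Theory | exploration/w33_lie_tower_s12_bridge.py | l6_asymmetric_pattern_to_generation_channel
-- ===== SOURCE A (Python) =====
-- from collections import Counter
--
-- def l6_asymmetric_pattern_to_generation_channel(
--     pattern: tuple[int, int, int, int, int, int]
-- ) -> tuple[int, int]:
--     counts = Counter(int(value) for value in pattern)
--     if sorted(counts.values()) != [1, 2, 3]:
--         raise ValueError("Expected an l6 asymmetric sextuple with multiplicities 1,2,3")
--     source_generation = next(int(generation) for generation, count in counts.items() if count == 3)
--     target_generation = next(int(generation) for generation, count in counts.items() if count == 1)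
--     return (source_generation, target_generation)
-- ===== SOURCE B (Python) =====
-- def l6_asymmetric_pattern_to_generation_channel(
--     pattern: tuple[int, int, int, int, int, int]
-- ) -> tuple[int, int]:
--     # Sort-then-scan: run lengths of the sorted sextuple replace hash counting.
--     s = sorted(int(value) for value in pattern)
--     runs = []
--     cur, n = s[0], 1
--     for v in s[1:]:
--         if v == cur:
--             n += 1
--         else:
--             runs.append((cur, n))
--             cur, n = v, 1
--     runs.append((cur, n))
--     if sorted(length for _, length in runs) != [1, 2, 3]:
--         raise ValueError("Expected an l6 asymmetric sextuple with multiplicities 1,2,3")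
--     source_generation = next(v for v, length in runs if length == 3)
--     target_generation = next(v for v, length in runs if length == 1)
--     return (source_generation, target_generation)
-- ===== Notes on version B (the rewrite author's own statement) =====
-- stated objective: alternative
-- what changed: Replaces Counter hash-counting over the sextuple by sorting it and scanning once for run lengths, then selecting the run of length 3 (source) and length 1 (target).
import Mathlib
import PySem

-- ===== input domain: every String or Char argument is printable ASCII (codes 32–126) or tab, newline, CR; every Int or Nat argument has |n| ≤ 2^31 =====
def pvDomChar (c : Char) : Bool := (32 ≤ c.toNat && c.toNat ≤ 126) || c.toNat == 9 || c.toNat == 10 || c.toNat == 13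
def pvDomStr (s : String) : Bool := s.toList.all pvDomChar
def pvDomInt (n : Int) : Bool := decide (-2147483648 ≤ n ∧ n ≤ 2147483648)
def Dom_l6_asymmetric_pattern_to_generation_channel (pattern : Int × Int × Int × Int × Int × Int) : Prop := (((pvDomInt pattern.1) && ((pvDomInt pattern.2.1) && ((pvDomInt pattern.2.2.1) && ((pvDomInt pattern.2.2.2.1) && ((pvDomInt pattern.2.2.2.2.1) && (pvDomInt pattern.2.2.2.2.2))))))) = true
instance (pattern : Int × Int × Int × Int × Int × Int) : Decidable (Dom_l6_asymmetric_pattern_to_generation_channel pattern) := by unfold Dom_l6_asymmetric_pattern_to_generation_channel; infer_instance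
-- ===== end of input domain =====

-- B replaces Counter hash-counting by sort-then-run-length-scan over the sextuple; alternative decomposition, same results.


-- ===== PORT A =====
def l6_asymmetric_pattern_to_generation_channel (pattern : Int × Int × Int × Int × Int × Int) : Int × Int :=
  let counts := PySem.Dict.counter
    [pattern.1, pattern.2.1, pattern.2.2.1, pattern.2.2.2.1, pattern.2.2.2.2.1, pattern.2.2.2.2.2]
  if PySem.List.sorted counts.values (fun x => x) false ≠ [1, 2, 3] then
    (0, 0)  -- Python raises ValueError here; these inputs are excluded by Pre_
  else
    let source := ((counts.items.find? (fun p => p.2 == 3)).map Prod.fst).getD 0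
    let target := ((counts.items.find? (fun p => p.2 == 1)).map Prod.fst).getD 0
    (source, target)

-- ===== PORT B =====
-- the scan of Source B: walk the sorted list keeping the current run (cur, n), emitting a run when the value changes
def pvRunsAux (cur : Int) (n : Int) : List Int → List (Int × Int)
  | [] => [(cur, n)]
  | v :: vs => if v = cur then pvRunsAux cur (n + 1) vs else (cur, n) :: pvRunsAux v 1 vs

def pvRuns : List Int → List (Int × Int)
  | [] => []   -- unreachable: the sorted sextuple is nonempty
  | x :: xs => pvRunsAux x 1 xs

def l6_asymmetric_pattern_to_generation_channel_alt (pattern : Int × Int × Int × Int × Int × Int) : Int × Int :=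
  let s := PySem.List.sorted
    [pattern.1, pattern.2.1, pattern.2.2.1, pattern.2.2.2.1, pattern.2.2.2.2.1, pattern.2.2.2.2.2]
    (fun x => x) false
  let runs := pvRuns s
  if PySem.List.sorted (runs.map Prod.snd) (fun x => x) false ≠ [1, 2, 3] then
    (0, 0)  -- Python raises ValueError here; these inputs are excluded by Pre_
  else
    let source := ((runs.find? (fun p => p.2 == 3)).map Prod.fst).getD 0
    let target := ((runs.find? (fun p => p.2 == 1)).map Prod.fst).getD 0
    (source, target)

-- ===== PRECONDITION & SPEC =====
-- Pre_ = exactly the inputs where A returns (otherwise both A and B raise ValueError):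
-- the six entries take three values with multiplicities 1, 2 and 3.
def Pre_l6_asymmetric_pattern_to_generation_channel (pattern : Int × Int × Int × Int × Int × Int) : Prop :=
  let l := [pattern.1, pattern.2.1, pattern.2.2.1, pattern.2.2.2.1, pattern.2.2.2.2.1, pattern.2.2.2.2.2]
  ∃ a ∈ l, ∃ b ∈ l, ∃ c ∈ l, l.count a = 1 ∧ l.count b = 2 ∧ l.count c = 3
instance (pattern : Int × Int × Int × Int × Int × Int) : Decidable (Pre_l6_asymmetric_pattern_to_generation_channel pattern) := by unfold Pre_l6_asymmetric_pattern_to_generation_channel; infer_instance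
def pvWitness_l6_asymmetric_pattern_to_generation_channel : (Int × Int × Int × Int × Int × Int) := (1, 2, 2, 3, 3, 3)
def Spec_l6_asymmetric_pattern_to_generation_channel (pattern : Int × Int × Int × Int × Int × Int) (out : Int × Int) : Prop := out = l6_asymmetric_pattern_to_generation_channel_alt pattern
instance (pattern : Int × Int × Int × Int × Int × Int) (out : Int × Int) : Decidable (Spec_l6_asymmetric_pattern_to_generation_channel pattern out) := by unfold Spec_l6_asymmetric_pattern_to_generation_channel; infer_instance

-- ===== CLAIM (what is proved, stated in full; the proofs are below) =====
def Claim_equal_l6_asymmetric_pattern_to_generation_channel : Prop := ∀ (pattern : Int × Int × Int × Int × Int × Int), Dom_l6_asymmetric_pattern_to_generation_channel pattern → Pre_l6_asymmetric_pattern_to_generation_channel pattern → Spec_l6_asymmetric_pattern_to_generation_channel pattern (l6_asymmetric_pattern_to_generation_channel pattern)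

-- ===== LEMMAS AND PROOFS =====

theorem pv_count_four_le (l : List Int) (a b c x : Int) (hab : a ≠ b) (hac : a ≠ c) (hbc : b ≠ c)
    (hxa : x ≠ a) (hxb : x ≠ b) (hxc : x ≠ c) :
    l.count a + l.count b + l.count c + l.count x ≤ l.length := by
  induction l with
  | nil => simp
  | cons h t ih =>
    simp only [List.count_cons, List.length_cons]
    split_ifs <;> simp_all <;> omega

theorem pv_mem_runsAux (vs : List Int) (cur : Int) (n : Int) (h : (cur :: vs).Pairwise (· ≤ ·))
    (w : Int) (m : Int) (hm : (w, m) ∈ pvRunsAux cur n vs) :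
    (w = cur ∧ m = n + vs.count cur) ∨ (cur < w ∧ w ∈ vs ∧ m = vs.count w) := by
  induction vs generalizing cur n with
  | nil => simp only [pvRunsAux, List.mem_singleton, Prod.mk.injEq] at hm; simp [hm]
  | cons v vs ih =>
    rw [List.pairwise_cons] at h
    obtain ⟨hle, hv⟩ := h
    have hcv : cur ≤ v := hle v (by simp)
    simp only [pvRunsAux] at hm
    by_cases hvc : v = cur
    · simp only [if_pos hvc] at hm
      subst hvc
      rcases ih v (n+1) hv hm with ⟨hw, hmm⟩ | ⟨hlt, hmem, hmm⟩
      · left; constructor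
        · exact hw
        · simp only [List.count_cons, beq_self_eq_true, if_true]; push_cast; omega
      · right
        refine ⟨hlt, by simp [hmem], ?_⟩
        simp only [List.count_cons, beq_iff_eq]
        rw [if_neg (by omega)]
        push_cast; omega
    · simp only [if_neg hvc] at hm
      have hcur_lt : cur < v := lt_of_le_of_ne hcv (fun e => hvc e.symm)
      rcases List.mem_cons.mp hm with heq | hmem
      · left
        have h1 : w = cur := by simpa using congrArg Prod.fst heq
        have h2 : m = n := by simpa using congrArg Prod.snd heq
      -- cur does not occur in v :: vs: all its elements are ≥ v > cur
        have hz : (v :: vs).count cur = 0 := by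
          rw [List.count_eq_zero]
          intro hc
          rcases List.mem_cons.mp hc with e | hc
          · omega
          · have := (List.pairwise_cons.mp hv).1 cur hc; omega
        exact ⟨h1, by rw [hz]; omega⟩
      · rcases ih v 1 hv hmem with ⟨hw, hmm⟩ | ⟨hlt, hmem', hmm⟩
        · right
          subst hw
          refine ⟨hcur_lt, by simp, ?_⟩
          simp only [List.count_cons, beq_self_eq_true, if_true]; push_cast; omega
        · right
          refine ⟨by omega, by simp [hmem'], ?_⟩
          simp only [List.count_cons, beq_iff_eq]
          rw [if_neg (by omega)]
          push_cast; omega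

theorem pv_keys_runsAux (vs : List Int) (cur : Int) (n : Int) (h : (cur :: vs).Pairwise (· ≤ ·)) :
    ((pvRunsAux cur n vs).map Prod.fst).Pairwise (· < ·) := by
  induction vs generalizing cur n with
  | nil => simp [pvRunsAux]
  | cons v vs ih =>
    rw [List.pairwise_cons] at h
    obtain ⟨hle, hv⟩ := h
    have hcv : cur ≤ v := hle v (by simp)
    simp only [pvRunsAux]
    by_cases hvc : v = cur
    · rw [if_pos hvc]; subst hvc; exact ih v (n+1) hv
    · rw [if_neg hvc]
      have hcur_lt : cur < v := lt_of_le_of_ne hcv (fun e => hvc e.symm)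
      simp only [List.map_cons]
      rw [List.pairwise_cons]
      refine ⟨?_, ih v 1 hv⟩
      intro k hk
      rcases List.mem_map.mp hk with ⟨p, hp, hpk⟩
      rcases pv_mem_runsAux vs v 1 hv p.1 p.2 (by simpa using hp) with ⟨hw, _⟩ | ⟨hlt, _, _⟩
      · omega
      · omega

theorem pv_exists_mem_runsAux (vs : List Int) (cur : Int) (n : Int)
    (w : Int) (hw : w ∈ cur :: vs) : ∃ m, (w, m) ∈ pvRunsAux cur n vs := by
  induction vs generalizing cur n with
  | nil => exact ⟨n, by simpa [pvRunsAux] using (by simpa using hw)⟩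
  | cons v vs ih =>
    simp only [pvRunsAux]
    by_cases hvc : v = cur
    · subst hvc
      rcases List.mem_cons.mp hw with e | hw'
      · exact (by rw [if_pos rfl]; exact ih v (n+1) (by simp [e]))
      · rw [if_pos rfl]; exact ih v (n+1) hw'
    · rw [if_neg hvc]
      rcases List.mem_cons.mp hw with e | hw'
      · exact ⟨n, by simp [e]⟩
      · obtain ⟨m, hm⟩ := ih v 1 hw'
        exact ⟨m, by simp [hm]⟩

-- common endgame: a nodup key list covering l's values, paired with l-counts, yields
-- sorted counts [1,2,3], first count-3 key = c and first count-1 key = a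
theorem pv_select (l : List Int) (a b c : Int)
    (ha : a ∈ l) (hc : c ∈ l)
    (h1 : l.count a = 1) (h2 : l.count b = 2) (h3 : l.count c = 3)
    (hcov : ∀ x ∈ l, x = a ∨ x = b ∨ x = c)
    (keys : List Int) (hnd : keys.Nodup) (hmem : ∀ x, x ∈ keys ↔ x ∈ l) :
    PySem.List.sorted ((keys.map (fun k => (k, (l.count k : Int)))).map Prod.snd) (fun x => x) false = [1, 2, 3]
    ∧ (((keys.map (fun k => (k, (l.count k : Int)))).find? (fun p => p.2 == 3)).map Prod.fst).getD 0 = c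
    ∧ (((keys.map (fun k => (k, (l.count k : Int)))).find? (fun p => p.2 == 1)).map Prod.fst).getD 0 = a := by
  have hab : a ≠ b := fun e => by rw [e] at h1; omega
  have hac : a ≠ c := fun e => by rw [e] at h1; omega
  have hbc : b ≠ c := fun e => by rw [e] at h2; omega
  have hb : b ∈ l := List.count_pos_iff.mp (by omega)
  have hperm : keys.Perm [a, b, c] := by
    refine (List.perm_ext_iff_of_nodup hnd (by simp [hab, hac, hbc])).mpr ?_
    intro x
    rw [hmem]
    constructor
    · intro hx; rcases hcov x hx with h | h | h <;> simp [h]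
    · intro hx; rcases (by simpa using hx : x = a ∨ x = b ∨ x = c) with h | h | h <;> simp [h, ha, hb, hc]
  have hpermv : ((keys.map (fun k => (k, (l.count k : Int)))).map Prod.snd).Perm [1, 2, 3] := by
    have h := hperm.map (fun k => (l.count k : Int))
    simp only [List.map_map]
    simpa [Function.comp_def, h1, h2, h3] using h
  refine ⟨PySem.List.sorted_eq_of_perm_of_pairwise_lt _ _ _ hpermv.symm (by decide), ?_, ?_⟩
  · have hex : ((keys.map (fun k => (k, (l.count k : Int)))).find? (fun p => p.2 == 3)).isSome := by
      rw [List.find?_isSome]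
      exact ⟨(c, (l.count c : Int)), List.mem_map.mpr ⟨c, (hmem c).mpr hc, rfl⟩, by simp [h3]⟩
    obtain ⟨p, hp⟩ := Option.isSome_iff_exists.mp hex
    have hpm := List.mem_of_find?_eq_some hp
    have hps : p.2 = 3 := by simpa using List.find?_some hp
    obtain ⟨k, hk, hgk⟩ := List.mem_map.mp hpm
    have hkl : k ∈ l := (hmem k).mp hk
    have hk3 : l.count k = 3 := by
      have : (l.count k : Int) = 3 := by rw [← hps, ← hgk]
      exact_mod_cast this
    have hkc : k = c := by
      rcases hcov k hkl with h | h | h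
      · subst h; omega
      · subst h; omega
      · exact h
    rw [hp]
    simp [← hgk, hkc]
  · have hex : ((keys.map (fun k => (k, (l.count k : Int)))).find? (fun p => p.2 == 1)).isSome := by
      rw [List.find?_isSome]
      exact ⟨(a, (l.count a : Int)), List.mem_map.mpr ⟨a, (hmem a).mpr ha, rfl⟩, by simp [h1]⟩
    obtain ⟨p, hp⟩ := Option.isSome_iff_exists.mp hex
    have hpm := List.mem_of_find?_eq_some hp
    have hps : p.2 = 1 := by simpa using List.find?_some hp
    obtain ⟨k, hk, hgk⟩ := List.mem_map.mp hpm
    have hkl : k ∈ l := (hmem k).mp hk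
    have hk1 : l.count k = 1 := by
      have : (l.count k : Int) = 1 := by rw [← hps, ← hgk]
      exact_mod_cast this
    have hka : k = a := by
      rcases hcov k hkl with h | h | h
      · exact h
      · subst h; omega
      · subst h; omega
    rw [hp]
    simp [← hgk, hka]

-- ===== VERDICT (by name: the statement is the Claim_ definition above) =====
theorem l6_asymmetric_pattern_to_generation_channel_spec : Claim_equal_l6_asymmetric_pattern_to_generation_channel := by
  intro pattern _ hpre
  obtain ⟨p1, p2, p3, p4, p5, p6⟩ := pattern
  unfold Spec_l6_asymmetric_pattern_to_generation_channel
  simp only [Pre_l6_asymmetric_pattern_to_generation_channel] at hpre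
  obtain ⟨a, ha, b, hb, c, hc, h1, h2, h3⟩ := hpre
  have hlen : ([p1, p2, p3, p4, p5, p6]).length = 6 := by simp
  have hab : a ≠ b := fun e => by rw [e] at h1; omega
  have hac : a ≠ c := fun e => by rw [e] at h1; omega
  have hbc : b ≠ c := fun e => by rw [e] at h2; omega
  have hcov : ∀ x ∈ [p1, p2, p3, p4, p5, p6], x = a ∨ x = b ∨ x = c := by
    intro x hx
    by_contra hcon
    rw [not_or, not_or] at hcon
    obtain ⟨hxa, hxb, hxc⟩ := hcon
    have h4 := pv_count_four_le ([p1, p2, p3, p4, p5, p6]) a b c x hab hac hbc hxa hxb hxc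
    have hx1 : 0 < ([p1, p2, p3, p4, p5, p6]).count x := List.count_pos_iff.mpr hx
    omega
  -- A side: the counter's items are the distinct values paired with their counts
  obtain ⟨hsA, hA3, hA1⟩ := pv_select ([p1, p2, p3, p4, p5, p6]) a b c ha hc h1 h2 h3 hcov
      (PySem.Set.ofList ([p1, p2, p3, p4, p5, p6])) (PySem.Set.nodup_ofList _)
      (fun x => PySem.Set.mem_ofList _ x)
  have hAval : l6_asymmetric_pattern_to_generation_channel (p1, p2, p3, p4, p5, p6) = (c, a) := by
    simp only [l6_asymmetric_pattern_to_generation_channel, PySem.Dict.values,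
      PySem.Dict.items_counter]
    rw [if_neg (by simp [- List.map_map, hsA])]
    rw [hA3, hA1]
  -- B side: the runs of the sorted list are the distinct values paired with their counts
  have hsp : (PySem.List.sorted ([p1, p2, p3, p4, p5, p6]) (fun x => x) false).Perm ([p1, p2, p3, p4, p5, p6]) :=
    PySem.List.sorted_perm _ _ _
  have hcnt : ∀ x, (PySem.List.sorted ([p1, p2, p3, p4, p5, p6]) (fun x => x) false).count x
      = ([p1, p2, p3, p4, p5, p6]).count x := fun x => hsp.count_eq x
  have hpw : (PySem.List.sorted ([p1, p2, p3, p4, p5, p6]) (fun x => x) false).Pairwise (· ≤ ·) :=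
    PySem.List.sorted_pairwise _ _
  have hslen : (PySem.List.sorted ([p1, p2, p3, p4, p5, p6]) (fun x => x) false).length = 6 := by
    rw [hsp.length_eq, hlen]
  obtain ⟨x, xs, hxs⟩ : ∃ x xs, PySem.List.sorted ([p1, p2, p3, p4, p5, p6]) (fun x => x) false = x :: xs := by
    cases hs : PySem.List.sorted ([p1, p2, p3, p4, p5, p6]) (fun x => x) false with
    | nil => rw [hs] at hslen; simp at hslen
    | cons x xs => exact ⟨x, xs, rfl⟩
  rw [hxs] at hcnt hpw
  -- every run is (w, its count); run values are nodup and cover the list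
  have hentry : ∀ p ∈ pvRunsAux x 1 xs, p.1 ∈ x :: xs ∧ p.2 = (([p1, p2, p3, p4, p5, p6]).count p.1 : Int) := by
    intro p hp
    rcases pv_mem_runsAux xs x 1 hpw p.1 p.2 (by simpa using hp) with ⟨hw, hm⟩ | ⟨hlt, hmem, hm⟩
    · refine ⟨by simp [hw], ?_⟩
      rw [← hcnt p.1, hw]
      simp only [List.count_cons, beq_self_eq_true, if_true]
      push_cast
      omega
    · refine ⟨by simp [hmem], ?_⟩
      rw [← hcnt p.1]
      simp only [List.count_cons, beq_iff_eq]
      rw [if_neg (by omega)]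
      push_cast
      omega
  have hkeysnd : ((pvRunsAux x 1 xs).map Prod.fst).Nodup :=
    (pv_keys_runsAux xs x 1 hpw).imp ne_of_lt
  have hkeysmem : ∀ y, y ∈ (pvRunsAux x 1 xs).map Prod.fst ↔ y ∈ [p1, p2, p3, p4, p5, p6] := by
    intro y
    constructor
    · intro hy
      obtain ⟨p, hp, hpy⟩ := List.mem_map.mp hy
      have := (hentry p hp).1
      rw [← hxs] at this
      exact hsp.subset (hpy ▸ this)
    · intro hy
      have : y ∈ x :: xs := by rw [← hxs]; exact hsp.symm.subset hy
      obtain ⟨m, hm⟩ := pv_exists_mem_runsAux xs x 1 y this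
      exact List.mem_map.mpr ⟨(y, m), hm, rfl⟩
  have hruns_eq : pvRunsAux x 1 xs
      = ((pvRunsAux x 1 xs).map Prod.fst).map (fun k => (k, (([p1, p2, p3, p4, p5, p6]).count k : Int))) := by
    rw [List.map_map]
    conv_lhs => rw [← List.map_id (pvRunsAux x 1 xs)]
    refine List.map_congr_left ?_
    intro p hp
    have := (hentry p hp).2
    simp [← this]
  obtain ⟨hsB, hB3, hB1⟩ := pv_select ([p1, p2, p3, p4, p5, p6]) a b c ha hc h1 h2 h3 hcov
      ((pvRunsAux x 1 xs).map Prod.fst) hkeysnd hkeysmem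
  have hBval : l6_asymmetric_pattern_to_generation_channel_alt (p1, p2, p3, p4, p5, p6) = (c, a) := by
    simp only [l6_asymmetric_pattern_to_generation_channel_alt, hxs, pvRuns]
    rw [hruns_eq]
    rw [if_neg (by simp [- List.map_map, hsB])]
    rw [hB3, hB1]
  rw [hAval, hBval]
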